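-- pv_equiv track=rewrite | github.com/ikaushikpal/DS-450-python | Greedy/Choose and Swap.py | chooseandswap
-- ===== SOURCE A (Python) =====
-- def chooseandswap (string):
--     occurrences = {}
--
--     for i in range(len(string)):
--         char = string[i]
--         if char not in occurrences:
--             occurrences[char] = i
--
--     for i in range(len(string)):
--         char = string[i]
--
--         if char not in occurrences:
--             continue
--
--         occurrences.pop(char)
--
--         if len(occurrences) == 0:
--             return string
--
--         minChar = min(occurrences, key=lambda x: x)
--         minChar = occurrences[minChar]
--
--         if i < minChar and ord(string[minChar]) < ord(char):
--             rChar = string[minChar]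
--             res = ''
--
--             for j in range(len(string)):
--                 xChar = string[j]
--
--                 if xChar == char:
--                     res += rChar
--
--                 elif xChar == rChar:
--                     res += char
--
--                 else:
--                     res += xChar
--             return res
--
--     return string
-- ===== SOURCE B (Python) =====
-- def chooseandswap(string):
--     firsts = list(dict.fromkeys(string))
--     suf = None
--     pair = None
--     for c in reversed(firsts):
--         if suf is not None and suf < c:
--             pair = (c, suf)
--         if suf is None or c < suf:
--             suf = c
--     if pair is None:
--         return string
--     c, m = pair
--     return ''.join(m if x == c else c if x == m else x for x in string)
-- ===== Notes on version B (the rewrite author's own statement) =====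
-- stated objective: faster
-- what changed: Replaces A's dict of first occurrences with a repeated min-over-remaining-keys scan for every distinct character by a single backward suffix-minimum pass over the distinct characters in first-occurrence order, then one swap pass.
import Mathlib
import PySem

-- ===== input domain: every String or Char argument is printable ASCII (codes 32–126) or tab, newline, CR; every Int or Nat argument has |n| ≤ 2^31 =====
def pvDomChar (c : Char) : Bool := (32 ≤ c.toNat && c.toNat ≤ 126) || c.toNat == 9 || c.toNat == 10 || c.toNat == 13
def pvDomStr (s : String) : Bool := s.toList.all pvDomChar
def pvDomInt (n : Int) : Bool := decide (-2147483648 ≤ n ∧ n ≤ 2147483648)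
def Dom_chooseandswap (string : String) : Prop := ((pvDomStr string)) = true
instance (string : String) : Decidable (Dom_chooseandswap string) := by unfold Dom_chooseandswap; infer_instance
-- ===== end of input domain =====

-- B replaces A's dict bookkeeping and repeated min-over-remaining-keys scans by one backward
-- suffix-minimum pass over the distinct characters in first-occurrence order (objective: faster).

-- ===== PORT A =====
-- first loop: occurrences[char] = first index of char
def caswFirstLoop (cs : List Char) : PySem.Dict Char Int :=
  (PySem.List.pyRange 0 cs.length 1).foldl
    (fun occ i =>
      let char := PySem.List.pyGetD cs i ' '
      if occ.contains char then occ else occ.insert char i)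
    PySem.Dict.empty

-- inner loop building res by concatenation
def caswRes (cs : List Char) (char rChar : Char) : List Char :=
  (PySem.List.pyRange 0 cs.length 1).foldl
    (fun res j =>
      let xChar := PySem.List.pyGetD cs j ' '
      if xChar == char then res ++ [rChar]
      else if xChar == rChar then res ++ [char]
      else res ++ [xChar]) []

-- second loop, with its early returns, as structural recursion on the index
def caswLoop (cs : List Char) (occ : PySem.Dict Char Int) (i : Nat) : List Char :=
  if h : i < cs.length then
    let char := PySem.List.pyGetD cs (i : Int) ' '
    if occ.contains char = false then caswLoop cs occ (i + 1)
    else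
      let occ2 := occ.erase char
      if occ2.size = 0 then cs
      else
        match PySem.List.min? occ2.keys (fun x => x) with
        | none => cs   -- unreachable (occ2 is nonempty here); totality guard only
        | some minKey =>
          let minChar := occ2.getD minKey 0
          if (i : Int) < minChar ∧ (PySem.List.pyGetD cs minChar ' ').toNat < char.toNat then
            caswRes cs char (PySem.List.pyGetD cs minChar ' ')
          else caswLoop cs occ2 (i + 1)
  else cs
termination_by cs.length - i

def chooseandswap (string : String) : String :=
  String.ofList (caswLoop string.toList (caswFirstLoop string.toList) 0)

-- ===== PORT B =====
-- one step of the backward scan: state = (suffix minimum so far, best pair so far)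
def caswScanStep (st : Option Char × Option (Char × Char)) (c : Char) :
    Option Char × Option (Char × Char) :=
  let pair := match st.1 with
    | some suf => if suf < c then some (c, suf) else st.2
    | none => st.2
  let suf := match st.1 with
    | some suf => if c < suf then some c else some suf
    | none => some c
  (suf, pair)

def chooseandswap_alt (string : String) : String :=
  let cs := string.toList
  let firsts := PySem.List.dedup cs        -- list(dict.fromkeys(string))
  let st := firsts.reverse.foldl caswScanStep (none, none)
  match st.2 with
  | none => string
  | some (c, m) =>
      String.ofList (cs.map fun x => if x == c then m else if x == m then c else x)

-- ===== PRECONDITION & SPEC =====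
def Spec_chooseandswap (string : String) (out : String) : Prop := out = chooseandswap_alt string
instance (string : String) (out : String) : Decidable (Spec_chooseandswap string out) := by unfold Spec_chooseandswap; infer_instance

-- ===== CLAIM (what is proved, stated in full; the proofs are below) =====
def Claim_equal_chooseandswap : Prop := ∀ (string : String), Dom_chooseandswap string → Spec_chooseandswap string (chooseandswap string)

-- ===== LEMMAS AND PROOFS =====

-- the distinct characters of cs from position i on that are not in `seen`,
-- paired with their first index; the common shape both ports reduce to
def caswFp (cs : List Char) (seen : List Char) (i : Nat) : List (Char × Int) :=
  if h : i < cs.length then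
    if cs[i] ∈ seen then caswFp cs seen (i + 1)
    else (cs[i], (i : Int)) :: caswFp cs (cs[i] :: seen) (i + 1)
  else []
termination_by cs.length - i

-- the abstract selection both loops compute: first distinct char whose suffix-min beats it
def caswSel : List Char → Option (Char × Char)
  | [] => none
  | c :: rest =>
    match PySem.List.min? rest (fun x => x) with
    | none => none
    | some m => if m < c then some (c, m) else caswSel rest

def caswAbs (cs : List Char) (l : List Char) : List Char :=
  match caswSel l with
  | none => cs
  | some (c, m) => cs.map fun x => if x == c then m else if x == m then c else x

theorem caswFp_mem (cs seen : List Char) (i : Nat) :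
    ∀ p ∈ caswFp cs seen i, ∃ j : Nat, p.2 = (j : Int) ∧ i ≤ j ∧ cs[j]? = some p.1 := by
  fun_induction caswFp with
  | case1 seen i h hm ih =>
    intro p hp
    obtain ⟨j, h1, h2, h3⟩ := ih p hp
    exact ⟨j, h1, by omega, h3⟩
  | case2 seen i h hm ih =>
    intro p hp
    rcases List.mem_cons.1 hp with rfl | hp
    · exact ⟨i, rfl, le_refl _, by simp [List.getElem?_eq_getElem h]⟩
    · obtain ⟨j, h1, h2, h3⟩ := ih p hp
      exact ⟨j, h1, by omega, h3⟩
  | case3 => simp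

theorem caswFp_not_seen (cs seen : List Char) (i : Nat) :
    ∀ p ∈ caswFp cs seen i, p.1 ∉ seen := by
  fun_induction caswFp with
  | case1 seen i h hm ih => exact ih
  | case2 seen i h hm ih =>
    intro p hp
    rcases List.mem_cons.1 hp with rfl | hp
    · exact hm
    · have := ih p hp
      intro hc; exact this (List.mem_cons_of_mem _ hc)
  | case3 => simp

theorem caswFp_nodup (cs seen : List Char) (i : Nat) :
    ((caswFp cs seen i).map Prod.fst).Nodup := by
  fun_induction caswFp with
  | case1 seen i h hm ih => exact ih
  | case2 seen i h hm ih =>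
    simp only [List.map_cons, List.nodup_cons]
    refine ⟨?_, ih⟩
    intro hc
    obtain ⟨p, hp, hp1⟩ := List.mem_map.1 hc
    exact caswFp_not_seen _ _ _ p hp (hp1 ▸ List.mem_cons_self)
  | case3 => simp

theorem caswFirstLoop_aux (cs : List Char) :
    ∀ (i : Nat) (d : PySem.Dict Char Int) (seen : List Char),
      (∀ c, d.contains c = true ↔ c ∈ seen) →
      ((PySem.List.pyRange i cs.length 1).foldl
        (fun occ j =>
          let char := PySem.List.pyGetD cs j ' '
          if occ.contains char then occ else occ.insert char j) d).items
        = d.items ++ caswFp cs seen i := by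
  intro i
  induction hk : cs.length - i using Nat.strong_induction_on generalizing i with
  | _ k ih =>
    intro d seen hmem
    by_cases h : i < cs.length
    · rw [PySem.List.pyRange_one_cons (by exact_mod_cast h), caswFp, dif_pos h]
      simp only [List.foldl_cons]
      have hchar : PySem.List.pyGetD cs (i : Int) ' ' = cs[i] := by
        simp [List.getD_eq_getElem?_getD, List.getElem?_eq_getElem h]
      by_cases hs : cs[i] ∈ seen
      · rw [if_pos hs]
        have : d.contains (PySem.List.pyGetD cs (i : Int) ' ') = true := by
          rw [hchar]; exact (hmem _).2 hs
        simp only [this, if_pos]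
        have := ih (cs.length - (i+1)) (by omega) (i+1) rfl d seen hmem
        exact_mod_cast this
      · rw [if_neg hs]
        have hc : d.contains (PySem.List.pyGetD cs (i : Int) ' ') = false := by
          rw [hchar]
          by_contra hcc
          exact hs ((hmem _).1 (by simpa using hcc))
        simp only [hc, Bool.false_eq_true, if_false]
        have hrec := ih (cs.length - (i+1)) (by omega) (i+1) rfl
          (d.insert (PySem.List.pyGetD cs (i : Int) ' ') (i : Int)) (cs[i] :: seen)
          (by intro c; simp [PySem.Dict.contains_insert, hchar, hmem c])
        rw [show ((i : Nat) + 1 : Int) = (((i+1 : Nat)) : Int) by push_cast; ring]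
        rw [hrec, PySem.Dict.items_insert_of_not_contains _ _ hc, hchar]
        simp
    · rw [caswFp, dif_neg h]
      have : PySem.List.pyRange i cs.length 1 = [] := by
        simp [PySem.List.pyRange]
        omega
      rw [this]
      simp

theorem caswFirstLoop_items (cs : List Char) :
    (caswFirstLoop cs).items = caswFp cs [] 0 := by
  have := caswFirstLoop_aux cs 0 PySem.Dict.empty [] (by simp [PySem.Dict.contains_empty])
  simpa [caswFirstLoop, PySem.Dict.empty, PySem.Dict.items] using this

theorem caswDedup_aux (cs : List Char) :
    ∀ (i : Nat) (acc seen : List Char), (∀ c, c ∈ acc ↔ c ∈ seen) →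
      (cs.drop i).foldl PySem.Set.add acc = acc ++ (caswFp cs seen i).map Prod.fst := by
  intro i
  induction hk : cs.length - i using Nat.strong_induction_on generalizing i with
  | _ k ih =>
    intro acc seen hmem
    by_cases h : i < cs.length
    · rw [List.drop_eq_getElem_cons h, caswFp]
      simp only [List.foldl_cons, h, dif_pos]
      by_cases hs : cs[i] ∈ seen
      · have hadd : PySem.Set.add acc cs[i] = acc := by
          simp only [PySem.Set.add]; rw [if_pos ((PySem.Set.contains_iff acc _).2 ((hmem _).2 hs))]
        rw [hadd, if_pos hs, ih (cs.length - (i+1)) (by omega) (i+1) rfl acc seen hmem]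
      · have hadd : PySem.Set.add acc cs[i] = acc ++ [cs[i]] := by
          simp only [PySem.Set.add]
          rw [if_neg]
          intro hc
          exact absurd ((hmem _).1 ((PySem.Set.contains_iff acc _).1 hc)) hs
        rw [hadd, if_neg hs,
          ih (cs.length - (i+1)) (by omega) (i+1) rfl (acc ++ [cs[i]]) (cs[i] :: seen)
            (by intro c; simp [hmem c, or_comm])]
        simp
    · rw [caswFp, dif_neg h, List.drop_eq_nil_of_le (by omega)]
      simp

theorem caswDedup_eq (cs : List Char) :
    PySem.List.dedup cs = (caswFp cs [] 0).map Prod.fst := by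
  have := caswDedup_aux cs 0 [] [] (by simp)
  simpa [PySem.List.dedup, PySem.Set.ofList, PySem.Set.empty] using this

theorem caswRes_eq_map (cs : List Char) (char rChar : Char) :
    caswRes cs char rChar =
      cs.map fun x => if x == char then rChar else if x == rChar then char else x := by
  unfold caswRes
  have hstep : (fun (res : List Char) (j : Int) =>
      let xChar := PySem.List.pyGetD cs j ' '
      if xChar == char then res ++ [rChar]
      else if xChar == rChar then res ++ [char]
      else res ++ [xChar])
      = fun res j => res ++ [(fun x => if x == char then rChar
          else if x == rChar then char else x) (PySem.List.pyGetD cs j ' ')] := by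
    funext res j
    simp only []
    split_ifs <;> rfl
  rw [hstep, PySem.List.foldl_append_singleton_eq_map]
  rw [show (fun j => (fun x => if x == char then rChar else if x == rChar then char else x)
      (PySem.List.pyGetD cs j ' '))
    = (fun x => if x == char then rChar else if x == rChar then char else x) ∘
      (fun j => PySem.List.pyGetD cs j ' ') from rfl, ← List.map_map]
  rw [show ((cs.length : Int)) = PySem.List.len cs by simp [PySem.List.len_eq]]
  rw [PySem.List.map_pyGetD_pyRange_zero]
  simp

theorem caswLoop_eq (cs : List Char) :
    ∀ (i : Nat) (seen : List Char) (occ : PySem.Dict Char Int),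
      occ.items = caswFp cs seen i → (∀ c, c ∈ seen ↔ c ∈ cs.take i) →
      caswLoop cs occ i = caswAbs cs ((caswFp cs seen i).map Prod.fst) := by
  intro i
  induction hk : cs.length - i using Nat.strong_induction_on generalizing i with
  | _ k ih =>
    intro seen occ hItems hSeen
    by_cases h : i < cs.length
    · rw [caswLoop]
      simp only [dif_pos h]
      have hchar : PySem.List.pyGetD cs (i : Int) ' ' = cs[i] := by
        simp [List.getD_eq_getElem?_getD, List.getElem?_eq_getElem h]
      have hSeen1 : cs[i] ∈ seen → ∀ c, c ∈ seen ↔ c ∈ cs.take (i + 1) := by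
        intro hs c
        rw [List.take_add_one, List.getElem?_eq_getElem h]
        simp only [List.mem_append, Option.toList_some, List.mem_singleton]
        constructor
        · intro hc; exact Or.inl ((hSeen c).1 hc)
        · rintro (hc | rfl)
          · exact (hSeen c).2 hc
          · exact hs
      have hSeen2 : ∀ c, c ∈ cs[i] :: seen ↔ c ∈ cs.take (i + 1) := by
        intro c
        rw [List.take_add_one, List.getElem?_eq_getElem h]
        simp only [List.mem_cons, List.mem_append, Option.toList_some, List.mem_singleton]
        rw [hSeen c]
        tauto
      by_cases hs : cs[i] ∈ seen
      · -- skipped position: char already consumed, not in occ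
        have hfp : caswFp cs seen i = caswFp cs seen (i + 1) := by
          rw [caswFp, dif_pos h, if_pos hs]
        have hcf : occ.contains (PySem.List.pyGetD cs (i : Int) ' ') = false := by
          rw [hchar]
          by_contra hcc
          rw [Bool.not_eq_false] at hcc
          simp only [PySem.Dict.contains, hItems, List.any_eq_true, beq_iff_eq] at hcc
          obtain ⟨p, hp, hp1⟩ := hcc
          exact caswFp_not_seen cs seen i p hp (hp1 ▸ hs)
        simp only [hcf, if_pos]
        rw [hfp]
        exact ih (cs.length - (i + 1)) (by omega) (i + 1) rfl seen occ
          (hfp ▸ hItems) (hSeen1 hs)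
      · -- first occurrence of cs[i]
        have hfp : caswFp cs seen i = (cs[i], (i : Int)) :: caswFp cs (cs[i] :: seen) (i + 1) := by
          rw [caswFp, dif_pos h, if_neg hs]
        set rest := caswFp cs (cs[i] :: seen) (i + 1) with hrest
        have hct : occ.contains (PySem.List.pyGetD cs (i : Int) ' ') = true := by
          rw [hchar]
          simp [PySem.Dict.contains, hItems, hfp]
        rw [hct]
        simp only [Bool.true_eq_false, if_false]
        have hrestne : ∀ p ∈ rest, p.1 ≠ cs[i] := by
          intro p hp
          have := caswFp_not_seen cs (cs[i] :: seen) (i + 1) p hp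
          intro hc; exact this (hc ▸ List.mem_cons_self)
        have hItems2 : (occ.erase (PySem.List.pyGetD cs (i : Int) ' ')).items = rest := by
          rw [hchar]
          show (occ.items.filter fun p => !p.1 == cs[i]) = rest
          rw [hItems, hfp]
          simp only [List.filter_cons, beq_self_eq_true, Bool.not_true, Bool.false_eq_true,
            if_false]
          exact List.filter_eq_self.2 (fun p hp => by simp [hrestne p hp])
        rcases hre : rest with _ | ⟨p0, rest'⟩
        · -- only one distinct char remains before the pop: return string
          have hsz : (occ.erase (PySem.List.pyGetD cs (i : Int) ' ')).size = 0 := by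
            show (occ.erase (PySem.List.pyGetD cs (i : Int) ' ')).items.length = 0
            rw [hItems2, hre]
            rfl
          rw [if_pos hsz, hfp, hre]
          simp [caswAbs, caswSel, PySem.List.min?]
        · have hsz : ¬ (occ.erase (PySem.List.pyGetD cs (i : Int) ' ')).size = 0 := by
            show ¬ (occ.erase (PySem.List.pyGetD cs (i : Int) ' ')).items.length = 0
            rw [hItems2, hre]
            simp
          rw [if_neg hsz]
          have hkeys : (occ.erase (PySem.List.pyGetD cs (i : Int) ' ')).keys
              = rest.map Prod.fst := by
            show (occ.erase (PySem.List.pyGetD cs (i : Int) ' ')).items.map Prod.fst = _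
            rw [hItems2]
          have hkeysnd : (occ.erase (PySem.List.pyGetD cs (i : Int) ' ')).keys.Nodup := by
            rw [hkeys, hrest]; exact caswFp_nodup cs (cs[i] :: seen) (i + 1)
          rcases hmk : PySem.List.min? (occ.erase (PySem.List.pyGetD cs (i : Int) ' ')).keys
              (fun x => x) with _ | m
          · exfalso
            have hnil : rest.map Prod.fst = [] := by
              rw [← hkeys]; exact (PySem.List.min?_eq_none_iff _ _).1 hmk
            rw [hre] at hnil
            simp at hnil
          · have hmmem : m ∈ rest.map Prod.fst := hkeys ▸ PySem.List.min?_mem hmk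
            obtain ⟨p, hp, hp1⟩ := List.mem_map.1 hmmem
            obtain ⟨jn, hj1, hj2, hj3⟩ := caswFp_mem cs (cs[i] :: seen) (i + 1) p (hrest ▸ hp)
            have hgetD : (occ.erase (PySem.List.pyGetD cs (i : Int) ' ')).getD m 0
                = (jn : Int) := by
              have hpeq : p = (m, (jn : Int)) := Prod.ext hp1 hj1
              have hpm : (m, (jn : Int)) ∈ (occ.erase (PySem.List.pyGetD cs (i : Int) ' ')).items := by
                rw [hItems2]
                exact hpeq ▸ hp
              exact PySem.Dict.getD_of_mem_items _ hpm hkeysnd 0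
            have hcsjn : PySem.List.pyGetD cs ((jn : Nat) : Int) ' ' = m := by
              simp only [PySem.List.pyGetD_natCast, List.getD_eq_getElem?_getD, hj3, hp1,
                Option.getD_some]
            have hmk' : PySem.List.min? (rest.map Prod.fst) (fun x => x) = some m := by
              rw [← hkeys]; exact hmk
            rw [hchar] at hgetD hmk hItems2
            simp only [hchar, hgetD, hcsjn]
            have hilt : (i : Int) < (jn : Int) := by exact_mod_cast (by omega : i < jn)
            rw [hfp]
            simp only [List.map_cons, caswAbs, caswSel, hmk']
            by_cases hlt : m < cs[i]
            · rw [if_pos ⟨hilt, hlt⟩, if_pos hlt, caswRes_eq_map]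
            · rw [if_neg (fun hc => hlt hc.2), if_neg hlt]
              have hrec := ih (cs.length - (i + 1)) (by omega) (i + 1) rfl (cs[i] :: seen)
                (occ.erase cs[i]) (hrest ▸ hItems2) hSeen2
              rw [hrec, hrest]
              simp only [caswAbs]
    · rw [caswLoop, dif_neg h, caswFp, dif_neg h]
      simp [caswAbs, caswSel, PySem.List.min?]

theorem caswMin_cons (c : Char) (rest : List Char) (m : Char)
    (hm : PySem.List.min? rest (fun x => x) = some m) :
    PySem.List.min? (c :: rest) (fun x => x) = some (if c < m then c else m) := by
  rcases rest with _ | ⟨r, t⟩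
  · simp [PySem.List.min?] at hm
  · rw [PySem.List.min?_id_cons] at hm ⊢
    simp only [List.foldl_cons]
    have hassoc : List.foldl min (min c r) t = min c (List.foldl min r t) :=
      List.foldl_assoc
    rw [hassoc, Option.some_inj.1 hm]
    rcases lt_trichotomy c m with h | h | h
    · simp [min_eq_left h.le, if_pos h]
    · subst h; simp [min_self]
    · have hnc : ¬ c < m := not_lt_of_gt h
      simp [min_eq_right h.le, if_neg hnc]

theorem caswScan_eq (l : List Char) :
    l.reverse.foldl caswScanStep (none, none) =
      (PySem.List.min? l (fun x => x), caswSel l) := by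
  induction l with
  | nil => simp [PySem.List.min?, caswSel]
  | cons c rest ih =>
    rw [List.reverse_cons, List.foldl_append, ih]
    rcases hm : PySem.List.min? rest (fun x => x) with _ | m
    · have : rest = [] := (PySem.List.min?_eq_none_iff _ _).1 hm
      subst this
      simp [caswScanStep, caswSel, PySem.List.min?]
    · rw [caswMin_cons c rest m hm]
      simp only [List.foldl_cons, List.foldl_nil, caswScanStep, caswSel, hm]
      split_ifs <;> rfl

-- ===== VERDICT (by name: the statement is the Claim_ definition above) =====
theorem chooseandswap_spec : Claim_equal_chooseandswap := by
  intro string _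
  show chooseandswap string = chooseandswap_alt string
  unfold chooseandswap chooseandswap_alt
  simp only [caswLoop_eq string.toList 0 [] (caswFirstLoop string.toList)
      (caswFirstLoop_items _) (by simp), caswScan_eq, caswDedup_eq]
  unfold caswAbs
  rcases caswSel ((caswFp string.toList [] 0).map Prod.fst) with _ | ⟨c, m⟩
  · simp [String.ofList_toList]
  · rfl
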